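-- pv_equiv track=rewrite | github.com/pleavinseven/word_of_the_day_bot | mutator.py | nasal
-- ===== SOURCE A (Python) =====
-- def nasal(word):
--     nasal_dict = {"b": "m", "ch": "ch", "c": "ngh", "dd": "dd", "d": "n", "g": "ng",
--                   "p": "mh", "th": "th", "t": "nh"
--                   }
--     for mutation in nasal_dict:
--         if word.startswith(mutation):
--             mutated_word = nasal_dict[mutation] + word[(len(mutation)):]
--             return mutated_word
--     return word
-- ===== SOURCE B (Python) =====
-- def nasal(word):
--     two = {"ch": "ch", "dd": "dd", "th": "th"}
--     one = {"b": "m", "c": "ngh", "d": "n", "g": "ng", "p": "mh", "t": "nh"}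
--     v = two.get(word[:2])
--     if v is not None:
--         return v + word[2:]
--     v = one.get(word[:1])
--     if v is not None:
--         return v + word[1:]
--     return word
-- ===== Notes on version B (the rewrite author's own statement) =====
-- stated objective: simpler
-- what changed: Replaces the ordered scan over dict keys with startswith tests by two exact-key lookups split by prefix length (digraphs first, then single letters), encoding the longest-prefix-first ordering as length priority.
import Mathlib
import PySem

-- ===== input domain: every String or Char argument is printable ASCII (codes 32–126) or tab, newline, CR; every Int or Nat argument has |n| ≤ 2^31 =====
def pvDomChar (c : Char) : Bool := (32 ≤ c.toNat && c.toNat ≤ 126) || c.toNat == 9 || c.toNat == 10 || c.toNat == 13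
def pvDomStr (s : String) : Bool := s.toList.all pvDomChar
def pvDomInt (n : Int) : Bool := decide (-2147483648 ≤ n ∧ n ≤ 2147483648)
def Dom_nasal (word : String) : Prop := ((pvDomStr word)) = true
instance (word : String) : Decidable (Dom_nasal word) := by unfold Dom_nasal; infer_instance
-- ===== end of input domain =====

-- B replaces the ordered startswith-scan over one dict by two exact-key lookups split by prefix length (simpler).

-- ===== PORT A =====
-- A's dict of mutations, in insertion order (keys/values as char lists; string ops stay on the list side).
def nasalDict : PySem.Dict (List Char) (List Char) := ⟨[(['b'], ['m']), (['c','h'], ['c','h']), (['c'], ['n','g','h']), (['d','d'], ['d','d']),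
   (['d'], ['n']), (['g'], ['n','g']), (['p'], ['m','h']), (['t','h'], ['t','h']), (['t'], ['n','h'])]⟩

-- the 'for mutation in nasal_dict' loop
def nasalGoA (w : List Char) : List (List Char) → List Char
  | [] => w
  | m :: rest =>
    if PySem.Chars.startswith w m then
      PySem.Dict.getD nasalDict m [] ++ PySem.List.slice w (some (m.length : Int)) none
    else nasalGoA w rest

def nasal (word : String) : String :=
  String.ofList (nasalGoA word.toList (PySem.Dict.keys nasalDict))

-- ===== PORT B =====
def nasalTwo : PySem.Dict (List Char) (List Char) := ⟨[(['c','h'], ['c','h']), (['d','d'], ['d','d']), (['t','h'], ['t','h'])]⟩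
def nasalOne : PySem.Dict (List Char) (List Char) := ⟨[(['b'], ['m']), (['c'], ['n','g','h']), (['d'], ['n']), (['g'], ['n','g']),
   (['p'], ['m','h']), (['t'], ['n','h'])]⟩

def nasalAltC (w : List Char) : List Char :=
  match PySem.Dict.get? nasalTwo (PySem.List.slice w none (some 2)) with
  | some v => v ++ PySem.List.slice w (some 2) none
  | none =>
    match PySem.Dict.get? nasalOne (PySem.List.slice w none (some 1)) with
    | some v => v ++ PySem.List.slice w (some 1) none
    | none => w

def nasal_alt (word : String) : String := String.ofList (nasalAltC word.toList)

-- ===== PRECONDITION & SPEC =====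
def Spec_nasal (word : String) (out : String) : Prop := out = nasal_alt word
instance (word : String) (out : String) : Decidable (Spec_nasal word out) := by unfold Spec_nasal; infer_instance

-- ===== CLAIM (what is proved, stated in full; the proofs are below) =====
def Claim_equal_nasal : Prop := ∀ (word : String), Dom_nasal word → Spec_nasal word (nasal word)

-- ===== LEMMAS AND PROOFS =====
theorem nasal_chars_eq (l : List Char) :
    nasalGoA l (PySem.Dict.keys nasalDict) = nasalAltC l := by
  have D : ∀ (w : List Char), nasalGoA w (PySem.Dict.keys nasalDict) = nasalGoA w
      [['b'], ['c','h'], ['c'], ['d','d'], ['d'], ['g'], ['p'], ['t','h'], ['t']] := fun _ => rfl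
  rw [D]
  match l with
  | [] => rfl
  | [c] =>
    by_cases hb : 'b' = c; · subst hb; decide
    by_cases hc : 'c' = c; · subst hc; decide
    by_cases hd : 'd' = c; · subst hd; decide
    by_cases hg : 'g' = c; · subst hg; decide
    by_cases hp : 'p' = c; · subst hp; decide
    by_cases ht : 't' = c; · subst ht; decide
    simp [nasalGoA, nasalAltC, nasalDict, nasalTwo, nasalOne, PySem.Chars.startswith,
      PySem.Dict.get?, PySem.List.slice, PySem.List.clampIdx, hb, hc, hd, hg, hp, ht]
  | c :: d :: rest =>
    by_cases hb : 'b' = c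
    · subst hb
      simp [nasalGoA, nasalAltC, nasalDict, nasalTwo, nasalOne, PySem.Chars.startswith,
        PySem.Dict.getD, PySem.Dict.get?, PySem.List.slice, PySem.List.clampIdx]
    by_cases hc : 'c' = c
    · subst hc
      by_cases hdh : 'h' = d
      · subst hdh
        simp [nasalGoA, nasalAltC, nasalDict, nasalTwo, nasalOne, PySem.Chars.startswith,
          PySem.Dict.getD, PySem.Dict.get?, PySem.List.slice, PySem.List.clampIdx]
      · simp [nasalGoA, nasalAltC, nasalDict, nasalTwo, nasalOne, PySem.Chars.startswith,
          PySem.Dict.getD, PySem.Dict.get?, PySem.List.slice, PySem.List.clampIdx, hdh]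
    by_cases hd : 'd' = c
    · subst hd
      by_cases hdd : 'd' = d
      · subst hdd
        simp [nasalGoA, nasalAltC, nasalDict, nasalTwo, nasalOne, PySem.Chars.startswith,
          PySem.Dict.getD, PySem.Dict.get?, PySem.List.slice, PySem.List.clampIdx]
      · simp [nasalGoA, nasalAltC, nasalDict, nasalTwo, nasalOne, PySem.Chars.startswith,
          PySem.Dict.getD, PySem.Dict.get?, PySem.List.slice, PySem.List.clampIdx, hdd]
    by_cases hg : 'g' = c
    · subst hg
      simp [nasalGoA, nasalAltC, nasalDict, nasalTwo, nasalOne, PySem.Chars.startswith,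
        PySem.Dict.getD, PySem.Dict.get?, PySem.List.slice, PySem.List.clampIdx]
    by_cases hp : 'p' = c
    · subst hp
      simp [nasalGoA, nasalAltC, nasalDict, nasalTwo, nasalOne, PySem.Chars.startswith,
        PySem.Dict.getD, PySem.Dict.get?, PySem.List.slice, PySem.List.clampIdx]
    by_cases ht : 't' = c
    · subst ht
      by_cases hth : 'h' = d
      · subst hth
        simp [nasalGoA, nasalAltC, nasalDict, nasalTwo, nasalOne, PySem.Chars.startswith,
          PySem.Dict.getD, PySem.Dict.get?, PySem.List.slice, PySem.List.clampIdx]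
      · simp [nasalGoA, nasalAltC, nasalDict, nasalTwo, nasalOne, PySem.Chars.startswith,
          PySem.Dict.getD, PySem.Dict.get?, PySem.List.slice, PySem.List.clampIdx, hth]
    simp [nasalGoA, nasalAltC, nasalDict, nasalTwo, nasalOne, PySem.Chars.startswith,
      PySem.Dict.get?, PySem.List.slice, PySem.List.clampIdx, hb, hc, hd, hg, hp, ht]

-- ===== VERDICT (by name: the statement is the Claim_ definition above) =====
theorem nasal_spec : Claim_equal_nasal := by
  intro word _
  unfold Spec_nasal nasal nasal_alt
  exact congrArg String.ofList (nasal_chars_eq word.toList)
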